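-- pv_equiv track=rewrite | github.com/CallmeAK09/orm_compiler | compiler/views.py | inject_app_label
-- ===== SOURCE A (Python) =====
-- def inject_app_label(code):
--     lines = code.split('\n')
--     new_lines = []
--     inside_model = False
--     indent = ""
--
--     for i, line in enumerate(lines):
--         stripped = line.strip()
--
--         # Detect model class
--         if stripped.startswith("class ") and "models.Model" in stripped:
--             inside_model = True
--             indent = line[:len(line) - len(line.lstrip())] + "    "
--             new_lines.append(line)
--             continue
--
--         # If inside model and Meta already exists → skip injection
--         if inside_model and stripped.startswith("class Meta"):
--             inside_model = False  # assume user handled it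
--             new_lines.append(line)
--             continue
--
--         # End of class (next class or empty line)
--         if inside_model and (stripped.startswith("class ") or stripped == ""):
--             # Inject Meta before leaving
--             new_lines.append(indent + "class Meta:")
--             new_lines.append(indent + "    app_label = 'compiler'")
--             inside_model = False
--
--         new_lines.append(line)
--
--     # Edge case: file ends while still inside model
--     if inside_model:
--         new_lines.append(indent + "class Meta:")
--         new_lines.append(indent + "    app_label = 'compiler'")
--
--     return "\n".join(new_lines)
-- ===== SOURCE B (Python) =====
-- def inject_app_label(code):
--     lines = code.split('\n')
--     n = len(lines)
--     out = []
--
--     def is_model(stripped):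
--         return stripped.startswith("class ") and "models.Model" in stripped
--
--     def indent_of(line):
--         return line[:len(line) - len(line.lstrip())] + "    "
--
--     i = 0
--     while i < n:
--         line = lines[i]
--         out.append(line)
--         if not is_model(line.strip()):
--             i += 1
--             continue
--         # model class found: inner scan for the block terminator
--         indent = indent_of(line)
--         j = i + 1
--         closed = False
--         while j < n:
--             lj = lines[j]
--             sj = lj.strip()
--             if is_model(sj):
--                 # model chained directly: keep scanning under the new indent
--                 indent = indent_of(lj)
--                 out.append(lj)
--                 j += 1
--                 continue
--             if sj.startswith("class Meta"):
--                 out.append(lj)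
--                 j += 1
--                 closed = True
--                 break
--             if sj.startswith("class ") or sj == "":
--                 out.append(indent + "class Meta:")
--                 out.append(indent + "    app_label = 'compiler'")
--                 out.append(lj)
--                 j += 1
--                 closed = True
--                 break
--             out.append(lj)
--             j += 1
--         if not closed:
--             out.append(indent + "class Meta:")
--             out.append(indent + "    app_label = 'compiler'")
--         i = j
--     return "\n".join(out)
-- ===== Notes on version B (the rewrite author's own statement) =====
-- stated objective: alternative
-- what changed: A's single pass carrying an inside_model flag and indent across the whole file is replaced by an outer scan that only looks for model-class starts and, per model found, an inner forward scan to the block terminator that splices in the two Meta lines.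
import Mathlib
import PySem

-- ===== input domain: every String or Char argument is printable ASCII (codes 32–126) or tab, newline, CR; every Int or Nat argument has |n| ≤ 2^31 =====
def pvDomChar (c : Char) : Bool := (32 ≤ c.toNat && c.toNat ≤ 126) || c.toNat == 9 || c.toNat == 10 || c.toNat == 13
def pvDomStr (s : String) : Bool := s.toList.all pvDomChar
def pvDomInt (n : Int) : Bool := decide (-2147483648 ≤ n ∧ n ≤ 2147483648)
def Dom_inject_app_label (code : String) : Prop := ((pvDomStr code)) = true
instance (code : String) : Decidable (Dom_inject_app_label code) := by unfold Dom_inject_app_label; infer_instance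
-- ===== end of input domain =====

-- B replaces A's single pass with a carried inside/indent flag by an outer scan for model-class
-- starts plus an inner forward scan to the block terminator (objective: alternative decomposition).

-- ===== PORT A =====
-- one step of A's for-loop; state = (new_lines, inside_model, indent); lines as List Char
def injStepA (st : List (List Char) × Bool × List Char) (line : List Char) :
    List (List Char) × Bool × List Char :=
  let stripped := PySem.Chars.strip line
  if PySem.Chars.startswith stripped "class ".toList &&
     PySem.Chars.isIn "models.Model".toList stripped then
    (st.1 ++ [line], true, line.take (line.length - (PySem.Chars.lstrip line).length) ++ "    ".toList)
  else if st.2.1 && PySem.Chars.startswith stripped "class Meta".toList then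
    (st.1 ++ [line], false, st.2.2)
  else if st.2.1 && (PySem.Chars.startswith stripped "class ".toList || stripped == []) then
    (st.1 ++ [st.2.2 ++ "class Meta:".toList, st.2.2 ++ "    app_label = 'compiler'".toList, line],
     false, st.2.2)
  else
    (st.1 ++ [line], st.2.1, st.2.2)

def inject_app_label (code : String) : String :=
  let lines := PySem.Chars.splitOn code.toList "\n".toList
  let st := lines.foldl injStepA ([], false, [])
  let out := if st.2.1 then
      st.1 ++ [st.2.2 ++ "class Meta:".toList, st.2.2 ++ "    app_label = 'compiler'".toList]
    else st.1
  String.ofList (PySem.Chars.join "\n".toList out)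

-- ===== PORT B =====
def pvIsModel (stripped : List Char) : Bool :=
  PySem.Chars.startswith stripped "class ".toList &&
  PySem.Chars.isIn "models.Model".toList stripped

def pvIndentOf (line : List Char) : List Char :=
  line.take (line.length - (PySem.Chars.lstrip line).length) ++ "    ".toList

def pvMetaHdr (indent : List Char) : List Char := indent ++ "class Meta:".toList
def pvMetaLbl (indent : List Char) : List Char := indent ++ "    app_label = 'compiler'".toList

mutual
-- B's outer while loop: copy lines, looking for a model-class start
def bOuter : List (List Char) → List (List Char)
  | [] => []
  | l :: ls =>
    if pvIsModel (PySem.Chars.strip l) then l :: bInner (pvIndentOf l) ls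
    else l :: bOuter ls
-- B's inner while loop: scan forward to the model's block terminator
def bInner (indent : List Char) : List (List Char) → List (List Char)
  | [] => [pvMetaHdr indent, pvMetaLbl indent]
  | l :: ls =>
    if pvIsModel (PySem.Chars.strip l) then l :: bInner (pvIndentOf l) ls
    else if PySem.Chars.startswith (PySem.Chars.strip l) "class Meta".toList then l :: bOuter ls
    else if PySem.Chars.startswith (PySem.Chars.strip l) "class ".toList ||
            PySem.Chars.strip l == [] then
      pvMetaHdr indent :: pvMetaLbl indent :: l :: bOuter ls
    else l :: bInner indent ls
end

def inject_app_label_alt (code : String) : String :=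
  String.ofList (PySem.Chars.join "\n".toList (bOuter (PySem.Chars.splitOn code.toList "\n".toList)))

-- ===== PRECONDITION & SPEC =====
def Spec_inject_app_label (code : String) (out : String) : Prop := out = inject_app_label_alt code
instance (code : String) (out : String) : Decidable (Spec_inject_app_label code out) := by unfold Spec_inject_app_label; infer_instance

-- ===== CLAIM (what is proved, stated in full; the proofs are below) =====
def Claim_equal_inject_app_label : Prop := ∀ (code : String), Dom_inject_app_label code → Spec_inject_app_label code (inject_app_label code)

-- ===== LEMMAS AND PROOFS =====

-- A's end-of-file fixup, applied to the fold state
def pvFinishA (st : List (List Char) × Bool × List Char) : List (List Char) :=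
  if st.2.1 then st.1 ++ [pvMetaHdr st.2.2, pvMetaLbl st.2.2] else st.1

-- injStepA rephrased through B's helper names (definitional)
theorem injStepA_char (acc : List (List Char)) (inside : Bool) (ind line : List Char) :
    injStepA (acc, inside, ind) line =
      if pvIsModel (PySem.Chars.strip line) = true then (acc ++ [line], true, pvIndentOf line)
      else if (inside && PySem.Chars.startswith (PySem.Chars.strip line) "class Meta".toList) = true then
        (acc ++ [line], false, ind)
      else if (inside && (PySem.Chars.startswith (PySem.Chars.strip line) "class ".toList ||
                          PySem.Chars.strip line == [])) = true then
        (acc ++ [pvMetaHdr ind, pvMetaLbl ind, line], false, ind)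
      else (acc ++ [line], inside, ind) := rfl

-- core invariant: A's fold from inside=false computes bOuter, from inside=true computes bInner
theorem pvFoldA_eq (ls : List (List Char)) :
    (∀ (acc : List (List Char)) (ind0 : List Char),
        pvFinishA (ls.foldl injStepA (acc, false, ind0)) = acc ++ bOuter ls) ∧
    (∀ (acc : List (List Char)) (ind : List Char),
        pvFinishA (ls.foldl injStepA (acc, true, ind)) = acc ++ bInner ind ls) := by
  induction ls with
  | nil => simp [pvFinishA, bOuter, bInner]
  | cons l ls ih =>
    constructor
    · intro acc ind0
      rw [List.foldl_cons, injStepA_char, bOuter]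
      by_cases hm : pvIsModel (PySem.Chars.strip l) = true
      · rw [if_pos hm, if_pos hm, ih.2]; simp
      · rw [if_neg hm, if_neg hm]
        simp only [Bool.false_and, Bool.false_eq_true, if_false]
        rw [ih.1]; simp
    · intro acc ind
      rw [List.foldl_cons, injStepA_char, bInner]
      by_cases hm : pvIsModel (PySem.Chars.strip l) = true
      · rw [if_pos hm, if_pos hm, ih.2]; simp
      · rw [if_neg hm, if_neg hm]
        simp only [Bool.true_and]
        by_cases hmeta : PySem.Chars.startswith (PySem.Chars.strip l) "class Meta".toList = true
        · rw [if_pos hmeta, if_pos hmeta, ih.1]; simp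
        · rw [if_neg hmeta, if_neg hmeta]
          by_cases hend : (PySem.Chars.startswith (PySem.Chars.strip l) "class ".toList ||
                           PySem.Chars.strip l == []) = true
          · rw [if_pos hend, if_pos hend, ih.1]; simp
          · rw [if_neg hend, if_neg hend, ih.2]; simp

-- ===== VERDICT (by name: the statement is the Claim_ definition above) =====
theorem inject_app_label_spec : Claim_equal_inject_app_label := by
  intro code _
  unfold Spec_inject_app_label inject_app_label inject_app_label_alt
  have h := (pvFoldA_eq (PySem.Chars.splitOn code.toList "\n".toList)).1 [] []
  simp only [pvFinishA, pvMetaHdr, pvMetaLbl] at h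
  simp only [h, List.nil_append]
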